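-- pv_equiv track=rewrite | github.com/brighteast99/coding-test-problems | boj/삼성 SW 역량 테스트 기출/마법사 상어와 복제/solution.py | select_path
-- ===== SOURCE A (Python) =====
-- import itertools
--
-- DIRECTIONS = [(-1, 0), (-1, -1), (0, -1), (1, -1), (1, 0), (1, 1), (0, 1), (-1, 1)]
--
-- def select_path(board, x, y):
--     possible_moves = []
--
--     max_score = 0
--     for moves in itertools.product([0, 2, 4, 6], repeat=3):
--         cur_x, cur_y = x, y
--         score = 0
--         visited = set((x, y))
--         for direction in moves:
--             dx, dy = DIRECTIONS[direction]
--             next_x, next_y = cur_x + dx, cur_y + dy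
--             if not (0 <= next_x < 4 and 0 <= next_y < 4):
--                 break
--             if (next_x, next_y) in visited:
--                 continue
--             cur_x, cur_y = next_x, next_y
--             visited.add((cur_x, cur_y))
--             score += len(board[cur_y][cur_x])
--         else:
--             if score > max_score:
--                 max_score = score
--                 possible_moves = []
--             if score >= max_score:
--                 possible_moves.append(moves)
--         continue
--
--     ORDER = {2: 0, 0: 1, 6: 2, 4: 3}
--     possible_moves.sort(
--         key=lambda moves: (ORDER[moves[0]], ORDER[moves[1]], ORDER[moves[2]])
--     )
--
--     return possible_moves[0]
--
-- board = [[list() for _ in range(4)] for _ in range(4)]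
-- ===== SOURCE B (Python) =====
-- DIRECTIONS = [(-1, 0), (-1, -1), (0, -1), (1, -1), (1, 0), (1, 1), (0, 1), (-1, 1)]
--
-- # Depth-first recursion over the move tree with shared prefixes: instead of simulating
-- # all 64 combos independently, collecting the maxima and sorting them by ORDER, each
-- # call returns the best (score, suffix) of its subtree, trying directions in priority
-- # order (2, 0, 6, 4) and keeping only strict improvements, so the result is the
-- # ORDER-lexicographically smallest maximum and paths are assembled back-to-front.
-- def select_path(board, x, y):
--     def best_suffix(depth, cur_x, cur_y, visited):
--         if depth == 0:
--             return (0, ())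
--         best = None
--         for d in (2, 0, 6, 4):
--             dx, dy = DIRECTIONS[d]
--             nx, ny = cur_x + dx, cur_y + dy
--             if not (0 <= nx < 4 and 0 <= ny < 4):
--                 continue
--             if (nx, ny) in visited:
--                 sub = best_suffix(depth - 1, cur_x, cur_y, visited)
--                 gain = 0
--             else:
--                 sub = best_suffix(depth - 1, nx, ny, visited | {(nx, ny)})
--                 gain = len(board[ny][nx])
--             if sub is None:
--                 continue
--             score = gain + sub[0]
--             if best is None or score > best[0]:
--                 best = (score, (d,) + sub[1])
--         return best
--
--     return best_suffix(3, x, y, set())[1]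
-- ===== Notes on version B (the rewrite author's own statement) =====
-- stated objective: alternative
-- what changed: A simulates each of the 64 move combos independently, collects all max-score combos into a list, sorts them by the ORDER key and returns the head; B is a depth-3 tree recursion that shares move prefixes: each call returns the best (score, suffix) of its subtree, trying directions in priority order (2,0,6,4) and keeping strict improvements, so the candidate list and the sort disappear and paths are built back-to-front.
import Mathlib
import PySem

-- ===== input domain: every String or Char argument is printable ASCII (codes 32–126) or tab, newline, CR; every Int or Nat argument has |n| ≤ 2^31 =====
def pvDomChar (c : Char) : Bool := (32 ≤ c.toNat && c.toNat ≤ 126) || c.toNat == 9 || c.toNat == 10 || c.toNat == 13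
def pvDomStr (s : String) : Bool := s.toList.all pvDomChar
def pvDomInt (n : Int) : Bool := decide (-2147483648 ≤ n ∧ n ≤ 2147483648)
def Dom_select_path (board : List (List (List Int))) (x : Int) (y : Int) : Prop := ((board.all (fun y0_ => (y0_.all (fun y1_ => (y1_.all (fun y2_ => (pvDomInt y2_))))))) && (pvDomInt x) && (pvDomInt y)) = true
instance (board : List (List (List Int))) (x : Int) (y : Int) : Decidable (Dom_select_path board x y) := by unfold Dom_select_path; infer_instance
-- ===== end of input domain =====

-- B replaces A's simulate-all-64-combos / collect-the-maxima / sort-by-ORDER / take-head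
-- selection by a depth-3 tree recursion sharing move prefixes, trying directions in
-- priority order and keeping strict maxima.

-- ===== PORT A =====
-- Faithfulness notes: Python's initial `visited = set((x, y))` contains the two INTS x and y,
-- which never compare equal to the (int, int) tuples later tested and added, so the walk's
-- visited set starts empty; each `.getD` marks a spot where Python would raise
-- (IndexError on board/possible_moves — excluded by Pre_select_path; DIRECTIONS[d]/ORDER[k]
-- are only ever reached with d ∈ {0,2,4,6}, so those defaults are unreachable).
def pvDirections : List (Int × Int) :=
  [(-1, 0), (-1, -1), (0, -1), (1, -1), (1, 0), (1, 1), (0, 1), (-1, 1)]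

def pvCell (board : List (List (List Int))) (cx cy : Int) : Int :=
  ((PySem.List.pyGet? ((PySem.List.pyGet? board cy).getD []) cx).getD []).length

-- A's inner `for direction in moves` loop; `none` = the loop broke (the for-else is skipped).
def pvWalkA (board : List (List (List Int))) :
    List Int → Int → Int → Int → PySem.Set (Int × Int) → Option Int
  | [], _, _, score, _ => some score
  | d :: rest, curX, curY, score, visited =>
    let dxy := (PySem.List.pyGet? pvDirections d).getD (0, 0)
    let nextX := curX + dxy.1
    let nextY := curY + dxy.2
    if ¬ (0 ≤ nextX ∧ nextX < 4 ∧ 0 ≤ nextY ∧ nextY < 4) then none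
    else if PySem.Set.contains visited (nextX, nextY) then
      pvWalkA board rest curX curY score visited
    else
      pvWalkA board rest nextX nextY (score + pvCell board nextX nextY)
        (PySem.Set.add visited (nextX, nextY))

-- itertools.product([0, 2, 4, 6], repeat=3)
def pvCombosA : List (Int × Int × Int) :=
  [0, 2, 4, 6].flatMap fun a => [0, 2, 4, 6].flatMap fun b => [0, 2, 4, 6].map fun c => (a, b, c)

def pvORDER : PySem.Dict Int Int := PySem.Dict.ofList [(2, 0), (0, 1), (6, 2), (4, 3)]

-- Python sorts by the tuple (ORDER[m0], ORDER[m1], ORDER[m2]) under lexicographic tuple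
-- comparison; every ORDER value lies in 0..3, so the packed integer o0*16 + o1*4 + o2 is a key
-- with exactly that comparison order (Lean's Prod order is not Python's tuple order).
def pvKeyA (m : Int × Int × Int) : Int :=
  16 * ((PySem.Dict.get? pvORDER m.1).getD 0) + 4 * ((PySem.Dict.get? pvORDER m.2.1).getD 0) +
    ((PySem.Dict.get? pvORDER m.2.2).getD 0)

def select_path (board : List (List (List Int))) (x : Int) (y : Int) : Int × Int × Int :=
  let folded := pvCombosA.foldl
    (fun (st : Int × List (Int × Int × Int)) moves =>
      match pvWalkA board [moves.1, moves.2.1, moves.2.2] x y 0 PySem.Set.empty with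
      | none => st
      | some score =>
        let st' := if score > st.1 then (score, ([] : List (Int × Int × Int))) else st
        if score ≥ st'.1 then (st'.1, st'.2 ++ [moves]) else st')
    (0, [])
  (PySem.List.pyGet? (PySem.List.sorted folded.2 pvKeyA) 0).getD (0, 0, 0)

-- ===== PORT B =====
-- B's recursive `best_suffix(depth, cur_x, cur_y, visited)`: returns the best
-- (score, move-suffix) of its subtree, `none` = no suffix stays on the board.
-- Python builds the suffix as a tuple `(d,) + sub[1]`; Lean has no variadic tuples,
-- so the port carries it as a `List Int` and converts the final 3-tuple at the end.
def pvBestSuffix (board : List (List (List Int))) :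
    Nat → Int → Int → PySem.Set (Int × Int) → Option (Int × List Int)
  | 0, _, _, _ => some ((0 : Int), ([] : List Int))
  | n + 1, cx, cy, v =>
    [2, 0, 6, 4].foldl
      (fun best (d : Int) =>
        let dxy := (PySem.List.pyGet? pvDirections d).getD (0, 0)
        let nx := cx + dxy.1
        let ny := cy + dxy.2
        if ¬ (0 ≤ nx ∧ nx < 4 ∧ 0 ≤ ny ∧ ny < 4) then best
        else
          let sg :=
            if PySem.Set.contains v (nx, ny) then (pvBestSuffix board n cx cy v, (0 : Int))
            else (pvBestSuffix board n nx ny (PySem.Set.add v (nx, ny)), pvCell board nx ny)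
          match sg.1 with
          | none => best
          | some sub =>
            let score := sg.2 + sub.1
            match best with
            | none => some (score, d :: sub.2)
            | some b => if score > b.1 then some (score, d :: sub.2) else best)
      none

-- `tuple` of the length-3 result list (the convention's Int × Int × Int)
def pvToTriple (ms : List Int) : Int × Int × Int :=
  ((PySem.List.pyGet? ms 0).getD 0, (PySem.List.pyGet? ms 1).getD 0, (PySem.List.pyGet? ms 2).getD 0)

def select_path_alt (board : List (List (List Int))) (x : Int) (y : Int) : Int × Int × Int :=
  match pvBestSuffix board 3 x y PySem.Set.empty with
  | some p => pvToTriple p.2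
  | none => (0, 0, 0)   -- Python B raises TypeError here (no feasible combo): outside Pre_select_path

-- ===== PRECONDITION & SPEC =====
-- Exactly the inputs on which the Python A returns (elsewhere it raises IndexError): some
-- 3-move combo stays on the 4×4 grid (the start is on the grid or axis-adjacent to it), and
-- every cell any combo's walk reads — the in-range cells within L1 distance 3 of the start —
-- is present in `board`.
def Pre_select_path (board : List (List (List Int))) (x : Int) (y : Int) : Prop :=
  ((-1 ≤ x ∧ x ≤ 4 ∧ 0 ≤ y ∧ y ≤ 3) ∨ (0 ≤ x ∧ x ≤ 3 ∧ -1 ≤ y ∧ y ≤ 4)) ∧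
  ∀ r ∈ ([0, 1, 2, 3] : List Int), ∀ c ∈ ([0, 1, 2, 3] : List Int),
    (c - x).natAbs + (r - y).natAbs ≤ 3 →
      (PySem.List.pyGet? ((PySem.List.pyGet? board r).getD []) c).isSome = true
instance (board : List (List (List Int))) (x : Int) (y : Int) : Decidable (Pre_select_path board x y) := by
  unfold Pre_select_path; infer_instance

def pvWitness_select_path : List (List (List Int)) × Int × Int :=
  ([[[], [], [], []], [[], [], [], []], [[], [], [], []], [[], [], [], []]], 0, 0)

def Spec_select_path (board : List (List (List Int))) (x : Int) (y : Int) (out : Int × Int × Int) : Prop := out = select_path_alt board x y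
instance (board : List (List (List Int))) (x : Int) (y : Int) (out : Int × Int × Int) : Decidable (Spec_select_path board x y out) := by unfold Spec_select_path; infer_instance

-- ===== CLAIM (what is proved, stated in full; the proofs are below) =====
def Claim_equal_select_path : Prop := ∀ (board : List (List (List Int))) (x : Int) (y : Int), Dom_select_path board x y → Pre_select_path board x y → Spec_select_path board x y (select_path board x y)

-- ===== LEMMAS AND PROOFS =====

-- abstractions used only by the proofs: A's fold step, the flat "first strict maximum"
-- fold B's recursion is reduced to, and the combining operator pvComb.
def pvStepA (f : Int × Int × Int → Option Int) (st : Int × List (Int × Int × Int))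
    (moves : Int × Int × Int) : Int × List (Int × Int × Int) :=
  match f moves with
  | none => st
  | some score =>
    let st' := if score > st.1 then (score, ([] : List (Int × Int × Int))) else st
    if score ≥ st'.1 then (st'.1, st'.2 ++ [moves]) else st'

def pvStepB (f : Int × Int × Int → Option Int) (best : Option (Int × (Int × Int × Int)))
    (moves : Int × Int × Int) : Option (Int × (Int × Int × Int)) :=
  match f moves with
  | none => best
  | some score =>
    match best with
    | none => some (score, moves)
    | some b => if score > b.1 then some (score, moves) else best

def pvStepL (g : List Int → Option Int) (best : Option (Int × List Int)) (ms : List Int) :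
    Option (Int × List Int) :=
  match g ms with
  | none => best
  | some s =>
    match best with
    | none => some (s, ms)
    | some b => if s > b.1 then some (s, ms) else best

def pvComb (acc o : Option (Int × List Int)) : Option (Int × List Int) :=
  match o with
  | none => acc
  | some p =>
    match acc with
    | none => some p
    | some b => if p.1 > b.1 then some p else acc

def pvCombosL : Nat → List (List Int)
  | 0 => [[]]
  | n + 1 => [2, 0, 6, 4].flatMap fun d => (pvCombosL n).map (d :: ·)

def pvG (f : Int × Int × Int → Option Int) (a : Int) (m : Int × Int × Int) : Int :=
  match f m with
  | some s => max a s
  | none => a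

def pvMaxF (f : Int × Int × Int → Option Int) (l : List (Int × Int × Int)) : Int :=
  l.foldl (pvG f) 0

def pvFilt (f : Int × Int × Int → Option Int) (v : Int) (l : List (Int × Int × Int)) :
    List (Int × Int × Int) :=
  l.filter fun m => decide (f m = some v)

def pvCombosB : List (Int × Int × Int) :=
  [2, 0, 6, 4].flatMap fun a => [2, 0, 6, 4].flatMap fun b => [2, 0, 6, 4].map fun c => (a, b, c)

theorem pvWalkA_le (board : List (List (List Int))) :
    ∀ (ms : List Int) (cx cy s : Int) (v : PySem.Set (Int × Int)) (r : Int),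
      pvWalkA board ms cx cy s v = some r → s ≤ r := by
  intro ms
  induction ms with
  | nil => intro cx cy s v r h; simp only [pvWalkA, Option.some.injEq] at h; omega
  | cons d rest ih =>
    intro cx cy s v r h
    simp only [pvWalkA] at h
    split_ifs at h with h1 h2
    · exact ih _ _ _ _ _ h
    · have h3 := ih _ _ _ _ _ h
      have h4 : (0 : Int) ≤ pvCell board (cx + ((PySem.List.pyGet? pvDirections d).getD (0, 0)).1) (cy + ((PySem.List.pyGet? pvDirections d).getD (0, 0)).2) := Int.natCast_nonneg _
      omega

-- score additivity of A's walk
theorem pvWalkA_add (board : List (List (List Int))) :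
    ∀ (ms : List Int) (cx cy s : Int) (v : PySem.Set (Int × Int)),
      pvWalkA board ms cx cy s v = (pvWalkA board ms cx cy 0 v).map (fun r => s + r) := by
  intro ms
  induction ms with
  | nil => intro cx cy s v; simp [pvWalkA]
  | cons d rest ih =>
    intro cx cy s v
    simp only [pvWalkA]
    split_ifs with h1 h2
    all_goals first
      | exact ih _ _ _ _
      | (rw [ih _ _ (s + _) _, ih _ _ (0 + _) _]
         cases pvWalkA board rest _ _ 0 _ <;> simp <;> ring)
      | simp

theorem le_foldl_pvG (f : Int × Int × Int → Option Int) :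
    ∀ (l : List (Int × Int × Int)) (a : Int), a ≤ l.foldl (pvG f) a := by
  intro l
  induction l with
  | nil => intro a; simp
  | cons m t ih =>
    intro a
    have h1 : a ≤ pvG f a m := by
      unfold pvG; cases f m <;> simp
    calc a ≤ pvG f a m := h1
      _ ≤ t.foldl (pvG f) (pvG f a m) := ih _
      _ = (m :: t).foldl (pvG f) a := rfl

theorem pvG_ub (f : Int × Int × Int → Option Int) :
    ∀ (l : List (Int × Int × Int)) (a : Int) (m : Int × Int × Int) (s : Int),
      m ∈ l → f m = some s → s ≤ l.foldl (pvG f) a := by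
  intro l
  induction l with
  | nil => intro a m s hm; simp at hm
  | cons m0 t ih =>
    intro a m s hm hf
    rcases List.mem_cons.mp hm with h | h
    · subst h
      have h1 : s ≤ pvG f a m := by simp only [pvG, hf]; exact le_max_right _ _
      exact le_trans h1 (le_foldl_pvG f t _)
    · exact ih _ _ _ h hf

theorem foldl_pvG_const (f : Int × Int × Int → Option Int) :
    ∀ (l : List (Int × Int × Int)) (a : Int), (∀ m ∈ l, f m = none) → l.foldl (pvG f) a = a := by
  intro l
  induction l with
  | nil => intro a _; rfl
  | cons m0 t ih =>
    intro a h
    have h0 : pvG f a m0 = a := by simp only [pvG, h m0 (by simp)]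
    show t.foldl (pvG f) (pvG f a m0) = a
    rw [h0]
    exact ih a (fun m hm => h m (List.mem_cons_of_mem _ hm))

theorem pvMaxF_mem (f : Int × Int × Int → Option Int) (hnn : ∀ m s, f m = some s → 0 ≤ s) :
    ∀ (l : List (Int × Int × Int)), (∃ m ∈ l, (f m).isSome) →
      ∃ m ∈ l, f m = some (pvMaxF f l) := by
  intro l
  induction l using List.reverseRecOn with
  | nil => rintro ⟨m, hm, _⟩; simp at hm
  | append_singleton t m ih =>
    intro _
    have hM : pvMaxF f (t ++ [m]) = pvG f (pvMaxF f t) m := by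
      unfold pvMaxF; rw [List.foldl_append]; rfl
    cases hfm : f m with
    | none =>
      have hMt : pvMaxF f (t ++ [m]) = pvMaxF f t := by rw [hM]; simp only [pvG, hfm]
      by_cases hex : ∃ m' ∈ t, (f m').isSome
      · obtain ⟨m', hm', hf'⟩ := ih hex
        exact ⟨m', List.mem_append_left _ hm', by rw [hMt]; exact hf'⟩
      · rcases ‹∃ m' ∈ t ++ [m], (f m').isSome› with ⟨m', hm', hs'⟩
        rcases List.mem_append.mp hm' with h | h
        · exact absurd ⟨m', h, hs'⟩ hex
        · simp at h; subst h; rw [hfm] at hs'; simp at hs'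
    | some sm =>
      by_cases hex : ∃ m' ∈ t, (f m').isSome
      · obtain ⟨m', hm', hf'⟩ := ih hex
        by_cases hle : sm ≤ pvMaxF f t
        · refine ⟨m', List.mem_append_left _ hm', ?_⟩
          rw [hM]; simp only [pvG, hfm]
          rw [max_eq_left hle]; exact hf'
        · refine ⟨m, List.mem_append_right _ (by simp), ?_⟩
          rw [hM]; simp only [pvG, hfm]
          rw [max_eq_right (le_of_lt (lt_of_not_ge hle))]
      · have hnone : ∀ m' ∈ t, f m' = none := by
          intro m' hm'
          cases hc : f m' with
          | none => rfl
          | some v => exact absurd ⟨m', hm', by rw [hc]; rfl⟩ hex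
        have hMt : pvMaxF f t = 0 := foldl_pvG_const f t 0 hnone
        refine ⟨m, List.mem_append_right _ (by simp), ?_⟩
        rw [hM]; simp only [pvG, hfm]
        rw [hMt, max_eq_right (hnn m sm hfm)]

theorem foldA (f : Int × Int × Int → Option Int) :
    ∀ (l : List (Int × Int × Int)),
      l.foldl (pvStepA f) (0, []) = (pvMaxF f l, pvFilt f (pvMaxF f l) l) := by
  intro l
  induction l using List.reverseRecOn with
  | nil => rfl
  | append_singleton t m ih =>
    rw [List.foldl_append, ih]
    have hM : pvMaxF f (t ++ [m]) = pvG f (pvMaxF f t) m := by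
      unfold pvMaxF; rw [List.foldl_append]; rfl
    have hfilt : ∀ v : Int, pvFilt f v (t ++ [m]) =
        pvFilt f v t ++ if f m = some v then [m] else [] := by
      intro v; unfold pvFilt; rw [List.filter_append]; split_ifs with h <;> simp [h]
    simp only [List.foldl_cons, List.foldl_nil]
    cases hfm : f m with
    | none =>
      have hM' : pvMaxF f (t ++ [m]) = pvMaxF f t := by rw [hM]; simp only [pvG, hfm]
      rw [hM', hfilt, if_neg (by simp [hfm]), List.append_nil]
      simp only [pvStepA, hfm]
    | some sm =>
      by_cases hlt : pvMaxF f t < sm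
      · have hM' : pvMaxF f (t ++ [m]) = sm := by
          rw [hM]; simp only [pvG, hfm]; exact max_eq_right (le_of_lt hlt)
        have hnil : pvFilt f sm t = [] := by
          unfold pvFilt
          rw [List.filter_eq_nil_iff]
          intro m' hm'
          simp only [decide_eq_true_eq]
          intro hc
          exact absurd (pvG_ub f t 0 m' sm hm' hc) (not_le.mpr hlt)
        rw [hM', hfilt, if_pos hfm, hnil, List.nil_append]
        simp only [pvStepA, hfm]
        split_ifs with h1 h2
        · simp
        · exfalso; omega
        · exfalso; omega
        · exfalso; omega
      · have hM' : pvMaxF f (t ++ [m]) = pvMaxF f t := by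
          rw [hM]; simp only [pvG, hfm]; exact max_eq_left (not_lt.mp hlt)
        by_cases heq : sm = pvMaxF f t
        · rw [hM', hfilt, if_pos (by rw [hfm, heq])]
          simp only [pvStepA, hfm]
          split_ifs with h1 h2
          · exfalso; omega
          · exfalso; omega
          · simp
          · exfalso; omega
        · rw [hM', hfilt, if_neg (by rw [hfm]; intro hc; exact heq (Option.some.inj hc)),
            List.append_nil]
          simp only [pvStepA, hfm]
          split_ifs with h1 h2
          · exfalso; omega
          · exfalso; omega
          · exfalso; exact heq (by omega)
          · rfl

theorem foldB (f : Int × Int × Int → Option Int) (hnn : ∀ m s, f m = some s → 0 ≤ s) :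
    ∀ (l : List (Int × Int × Int)),
      l.foldl (pvStepB f) none =
        (pvFilt f (pvMaxF f l) l).head?.map (fun m => (pvMaxF f l, m)) := by
  intro l
  induction l using List.reverseRecOn with
  | nil => rfl
  | append_singleton t m ih =>
    rw [List.foldl_append, ih]
    have hM : pvMaxF f (t ++ [m]) = pvG f (pvMaxF f t) m := by
      unfold pvMaxF; rw [List.foldl_append]; rfl
    have hfilt : ∀ v : Int, pvFilt f v (t ++ [m]) =
        pvFilt f v t ++ if f m = some v then [m] else [] := by
      intro v; unfold pvFilt; rw [List.filter_append]; split_ifs with h <;> simp [h]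
    simp only [List.foldl_cons, List.foldl_nil]
    cases hfm : f m with
    | none =>
      have hM' : pvMaxF f (t ++ [m]) = pvMaxF f t := by rw [hM]; simp only [pvG, hfm]
      rw [hM', hfilt, if_neg (by simp [hfm]), List.append_nil]
      cases (pvFilt f (pvMaxF f t) t).head? <;> simp [pvStepB, hfm]
    | some sm =>
      by_cases hex : ∃ m' ∈ t, (f m').isSome
      · obtain ⟨mx, hmx, hfx⟩ := pvMaxF_mem f hnn t hex
        obtain ⟨bm, rest, hbr⟩ : ∃ bm rest, pvFilt f (pvMaxF f t) t = bm :: rest := by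
          cases hcase : pvFilt f (pvMaxF f t) t with
          | nil =>
            exfalso
            have hmem : mx ∈ pvFilt f (pvMaxF f t) t := by
              unfold pvFilt; rw [List.mem_filter]; exact ⟨hmx, by simp [hfx]⟩
            rw [hcase] at hmem; simp at hmem
          | cons a b => exact ⟨a, b, rfl⟩
        by_cases hlt : pvMaxF f t < sm
        · have hM' : pvMaxF f (t ++ [m]) = sm := by
            rw [hM]; simp only [pvG, hfm]; exact max_eq_right (le_of_lt hlt)
          have hnil : pvFilt f sm t = [] := by
            unfold pvFilt
            rw [List.filter_eq_nil_iff]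
            intro m' hm'
            simp only [decide_eq_true_eq]
            intro hc
            exact absurd (pvG_ub f t 0 m' sm hm' hc) (not_le.mpr hlt)
          rw [hM', hfilt, if_pos hfm, hnil, List.nil_append, hbr]
          simp only [List.head?_cons, Option.map_some, pvStepB, hfm]
          rw [if_pos hlt]
        · have hM' : pvMaxF f (t ++ [m]) = pvMaxF f t := by
            rw [hM]; simp only [pvG, hfm]; exact max_eq_left (not_lt.mp hlt)
          rw [hM', hfilt, hbr]
          simp only [List.cons_append, List.head?_cons, Option.map_some, pvStepB, hfm]
          rw [if_neg hlt]
      · have hnone : ∀ m' ∈ t, f m' = none := by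
          intro m' hm'
          cases hc : f m' with
          | none => rfl
          | some v => exact absurd ⟨m', hm', by rw [hc]; rfl⟩ hex
        have hMt : pvMaxF f t = 0 := foldl_pvG_const f t 0 hnone
        have hM' : pvMaxF f (t ++ [m]) = sm := by
          rw [hM]; simp only [pvG, hfm]; rw [hMt, max_eq_right (hnn m sm hfm)]
        have hnil : ∀ v : Int, pvFilt f v t = [] := by
          intro v; unfold pvFilt
          rw [List.filter_eq_nil_iff]
          intro m' hm'
          simp [hnone m' hm']
        rw [hM', hfilt, if_pos hfm, hnil, hnil, List.nil_append]
        simp [pvStepB, hfm]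

theorem pvCombosB_perm : pvCombosB.Perm pvCombosA := by
  rw [← List.isPerm_iff]
  decide

theorem pvCombosB_pairwise : pvCombosB.Pairwise (fun a b => pvKeyA a < pvKeyA b) := by
  decide

theorem pvMaxF_combos (f : Int × Int × Int → Option Int) :
    pvMaxF f pvCombosA = pvMaxF f pvCombosB := by
  unfold pvMaxF
  refine pvCombosB_perm.symm.foldl_eq' (fun x _ y _ z => ?_) 0
  simp only [pvG]
  cases f x <;> cases f y <;> simp [max_right_comm]

-- A's whole selection, with the per-combo walk abstracted as f: it equals the single
-- first-strict-maximum reduction over the ORDER-sorted combo list pvCombosB.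
theorem pvSelect_general (f : Int × Int × Int → Option Int)
    (hnn : ∀ m s, f m = some s → 0 ≤ s) :
    (PySem.List.pyGet?
        (PySem.List.sorted (pvCombosA.foldl (pvStepA f) (0, [])).2 pvKeyA) 0).getD (0, 0, 0) =
      (match pvCombosB.foldl (pvStepB f) none with
        | some b => b.2
        | none => (0, 0, 0)) := by
  rw [foldA f, foldB f hnn]
  have hsorted : PySem.List.sorted (pvFilt f (pvMaxF f pvCombosA) pvCombosA) pvKeyA =
      pvFilt f (pvMaxF f pvCombosA) pvCombosB := by
    apply PySem.List.sorted_eq_of_perm_of_pairwise_lt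
    · exact pvCombosB_perm.filter _
    · exact List.Pairwise.sublist List.filter_sublist pvCombosB_pairwise
  rw [hsorted, pvMaxF_combos f]
  cases (pvFilt f (pvMaxF f pvCombosB) pvCombosB) with
  | nil => simp [PySem.List.pyGet?, PySem.List.pyIdx?]
  | cons a b => simp [PySem.List.pyGet?, PySem.List.pyIdx?]

-- ===== B-side lemmas: the tree recursion equals the flat first-strict-max fold =====

-- fold with an arbitrary accumulator = accumulator combined with the fold from none
theorem pvStepL_acc (g : List Int → Option Int) :
    ∀ (l : List (List Int)) (acc : Option (Int × List Int)),
      l.foldl (pvStepL g) acc = pvComb acc (l.foldl (pvStepL g) none) := by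
  intro l
  induction l with
  | nil => intro acc; cases acc <;> rfl
  | cons x t ih =>
    intro acc
    have key : ∀ (a o : Option (Int × List Int)),
        pvComb (pvStepL g a x) o = pvComb a (pvComb (pvStepL g none x) o) := by
      intro a o
      cases hgx : g x <;> cases a <;> cases o <;>
        simp only [pvStepL, pvComb, hgx] <;> split_ifs <;>
        first | rfl | (exfalso; omega) | (simp only [pvComb]; split_ifs <;> first | rfl | omega)
    calc (x :: t).foldl (pvStepL g) acc
        = t.foldl (pvStepL g) (pvStepL g acc x) := rfl
      _ = pvComb (pvStepL g acc x) (t.foldl (pvStepL g) none) := ih _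
      _ = pvComb acc (pvComb (pvStepL g none x) (t.foldl (pvStepL g) none)) := key _ _
      _ = pvComb acc ((x :: t).foldl (pvStepL g) none) := by
            show _ = pvComb acc (t.foldl (pvStepL g) (pvStepL g none x))
            rw [ih (pvStepL g none x)]

-- fold over a (d :: ·)-mapped list, when evaluation factors through an offset c
theorem pvStepL_map (g h : List Int → Option Int) (d c : Int)
    (hg : ∀ ms, g (d :: ms) = (h ms).map (fun s => c + s)) :
    ∀ (l : List (List Int)) (acc : Option (Int × List Int)),
      (l.map (d :: ·)).foldl (pvStepL g) (acc.map (fun p => (c + p.1, d :: p.2))) =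
        (l.foldl (pvStepL h) acc).map (fun p => (c + p.1, d :: p.2)) := by
  intro l
  induction l with
  | nil => intro acc; rfl
  | cons ms t ih =>
    intro acc
    have step : pvStepL g (acc.map (fun p => (c + p.1, d :: p.2))) (d :: ms) =
        (pvStepL h acc ms).map (fun p => (c + p.1, d :: p.2)) := by
      cases hh : h ms <;> cases acc <;>
        simp only [pvStepL, hg, hh, Option.map_some, Option.map_none] <;>
        split_ifs <;> first | rfl | omega
    show (t.map (d :: ·)).foldl (pvStepL g) (pvStepL g (acc.map _) (d :: ms)) = _
    rw [step, ih]
    rfl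

theorem pvStepL_map_none (g : List Int → Option Int) (d : Int)
    (hg : ∀ ms, g (d :: ms) = none) :
    ∀ (l : List (List Int)) (acc : Option (Int × List Int)),
      (l.map (d :: ·)).foldl (pvStepL g) acc = acc := by
  intro l
  induction l with
  | nil => intro acc; rfl
  | cons ms t ih =>
    intro acc
    show (t.map (d :: ·)).foldl (pvStepL g) (pvStepL g acc (d :: ms)) = acc
    rw [show pvStepL g acc (d :: ms) = acc by simp only [pvStepL, hg]]
    exact ih acc

-- the main B-side reduction
theorem pvBestSuffix_eq (board : List (List (List Int))) :
    ∀ (n : Nat) (cx cy : Int) (v : PySem.Set (Int × Int)),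
      pvBestSuffix board n cx cy v =
        (pvCombosL n).foldl (pvStepL (fun ms => pvWalkA board ms cx cy 0 v)) none := by
  intro n
  induction n with
  | zero => intro cx cy v; rfl
  | succ n ih =>
    intro cx cy v
    -- per-direction: the fold over the (d :: ·)-block equals B's per-direction step
    have dir : ∀ (d : Int) (acc : Option (Int × List Int)),
        ((pvCombosL n).map (d :: ·)).foldl
            (pvStepL (fun ms => pvWalkA board ms cx cy 0 v)) acc =
          (if ¬ (0 ≤ cx + ((PySem.List.pyGet? pvDirections d).getD (0, 0)).1 ∧
                 cx + ((PySem.List.pyGet? pvDirections d).getD (0, 0)).1 < 4 ∧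
                 0 ≤ cy + ((PySem.List.pyGet? pvDirections d).getD (0, 0)).2 ∧
                 cy + ((PySem.List.pyGet? pvDirections d).getD (0, 0)).2 < 4) then acc
           else
             match (if PySem.Set.contains v (cx + ((PySem.List.pyGet? pvDirections d).getD (0, 0)).1,
                        cy + ((PySem.List.pyGet? pvDirections d).getD (0, 0)).2) = true
                    then (pvBestSuffix board n cx cy v, (0 : Int))
                    else (pvBestSuffix board n
                            (cx + ((PySem.List.pyGet? pvDirections d).getD (0, 0)).1)
                            (cy + ((PySem.List.pyGet? pvDirections d).getD (0, 0)).2)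
                            (PySem.Set.add v (cx + ((PySem.List.pyGet? pvDirections d).getD (0, 0)).1,
                              cy + ((PySem.List.pyGet? pvDirections d).getD (0, 0)).2)),
                          pvCell board (cx + ((PySem.List.pyGet? pvDirections d).getD (0, 0)).1)
                            (cy + ((PySem.List.pyGet? pvDirections d).getD (0, 0)).2))).1 with
             | none => acc
             | some sub =>
               match acc with
               | none => some ((if PySem.Set.contains v (cx + ((PySem.List.pyGet? pvDirections d).getD (0, 0)).1,
                        cy + ((PySem.List.pyGet? pvDirections d).getD (0, 0)).2) = true
                    then (pvBestSuffix board n cx cy v, (0 : Int))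
                    else (pvBestSuffix board n
                            (cx + ((PySem.List.pyGet? pvDirections d).getD (0, 0)).1)
                            (cy + ((PySem.List.pyGet? pvDirections d).getD (0, 0)).2)
                            (PySem.Set.add v (cx + ((PySem.List.pyGet? pvDirections d).getD (0, 0)).1,
                              cy + ((PySem.List.pyGet? pvDirections d).getD (0, 0)).2)),
                          pvCell board (cx + ((PySem.List.pyGet? pvDirections d).getD (0, 0)).1)
                            (cy + ((PySem.List.pyGet? pvDirections d).getD (0, 0)).2))).2 + sub.1, d :: sub.2)
               | some b => if (if PySem.Set.contains v (cx + ((PySem.List.pyGet? pvDirections d).getD (0, 0)).1,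
                        cy + ((PySem.List.pyGet? pvDirections d).getD (0, 0)).2) = true
                    then (pvBestSuffix board n cx cy v, (0 : Int))
                    else (pvBestSuffix board n
                            (cx + ((PySem.List.pyGet? pvDirections d).getD (0, 0)).1)
                            (cy + ((PySem.List.pyGet? pvDirections d).getD (0, 0)).2)
                            (PySem.Set.add v (cx + ((PySem.List.pyGet? pvDirections d).getD (0, 0)).1,
                              cy + ((PySem.List.pyGet? pvDirections d).getD (0, 0)).2)),
                          pvCell board (cx + ((PySem.List.pyGet? pvDirections d).getD (0, 0)).1)
                            (cy + ((PySem.List.pyGet? pvDirections d).getD (0, 0)).2))).2 + sub.1 > b.1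
                   then some ((if PySem.Set.contains v (cx + ((PySem.List.pyGet? pvDirections d).getD (0, 0)).1,
                        cy + ((PySem.List.pyGet? pvDirections d).getD (0, 0)).2) = true
                    then (pvBestSuffix board n cx cy v, (0 : Int))
                    else (pvBestSuffix board n
                            (cx + ((PySem.List.pyGet? pvDirections d).getD (0, 0)).1)
                            (cy + ((PySem.List.pyGet? pvDirections d).getD (0, 0)).2)
                            (PySem.Set.add v (cx + ((PySem.List.pyGet? pvDirections d).getD (0, 0)).1,
                              cy + ((PySem.List.pyGet? pvDirections d).getD (0, 0)).2)),
                          pvCell board (cx + ((PySem.List.pyGet? pvDirections d).getD (0, 0)).1)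
                            (cy + ((PySem.List.pyGet? pvDirections d).getD (0, 0)).2))).2 + sub.1, d :: sub.2) else acc)
             := by
      intro d acc
      by_cases hin : ¬ (0 ≤ cx + ((PySem.List.pyGet? pvDirections d).getD (0, 0)).1 ∧
          cx + ((PySem.List.pyGet? pvDirections d).getD (0, 0)).1 < 4 ∧
          0 ≤ cy + ((PySem.List.pyGet? pvDirections d).getD (0, 0)).2 ∧
          cy + ((PySem.List.pyGet? pvDirections d).getD (0, 0)).2 < 4)
      · rw [pvStepL_map_none _ d (fun ms => by simp only [pvWalkA]; rw [if_pos hin]),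
          if_pos hin]
      · rw [if_neg hin]
        by_cases hvis : PySem.Set.contains v
            (cx + ((PySem.List.pyGet? pvDirections d).getD (0, 0)).1,
             cy + ((PySem.List.pyGet? pvDirections d).getD (0, 0)).2) = true
        · have hg : ∀ ms, pvWalkA board (d :: ms) cx cy 0 v =
              (pvWalkA board ms cx cy 0 v).map (fun s => (0 : Int) + s) := by
            intro ms
            simp only [pvWalkA]
            rw [if_neg hin, if_pos hvis]
            cases pvWalkA board ms cx cy 0 v <;> simp
          have hmap := pvStepL_map (fun ms => pvWalkA board ms cx cy 0 v)
            (fun ms => pvWalkA board ms cx cy 0 v) d 0 hg (pvCombosL n) none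
          simp only [Option.map_none] at hmap
          rw [pvStepL_acc, hmap, ← ih, if_pos hvis]
          cases pvBestSuffix board n cx cy v with
          | none => cases acc <;> rfl
          | some p => cases acc <;> simp [pvComb] <;> split_ifs <;> rfl
        · have hg : ∀ ms, pvWalkA board (d :: ms) cx cy 0 v =
              (pvWalkA board ms
                  (cx + ((PySem.List.pyGet? pvDirections d).getD (0, 0)).1)
                  (cy + ((PySem.List.pyGet? pvDirections d).getD (0, 0)).2) 0
                  (PySem.Set.add v (cx + ((PySem.List.pyGet? pvDirections d).getD (0, 0)).1,
                    cy + ((PySem.List.pyGet? pvDirections d).getD (0, 0)).2))).map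
                (fun s => pvCell board (cx + ((PySem.List.pyGet? pvDirections d).getD (0, 0)).1)
                    (cy + ((PySem.List.pyGet? pvDirections d).getD (0, 0)).2) + s) := by
            intro ms
            simp only [pvWalkA]
            rw [if_neg hin, if_neg hvis, pvWalkA_add]
            cases pvWalkA board ms
                (cx + ((PySem.List.pyGet? pvDirections d).getD (0, 0)).1)
                (cy + ((PySem.List.pyGet? pvDirections d).getD (0, 0)).2) 0
                (PySem.Set.add v _) <;> simp
          have hmap := pvStepL_map (fun ms => pvWalkA board ms cx cy 0 v)
            (fun ms => pvWalkA board ms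
              (cx + ((PySem.List.pyGet? pvDirections d).getD (0, 0)).1)
              (cy + ((PySem.List.pyGet? pvDirections d).getD (0, 0)).2) 0
              (PySem.Set.add v (cx + ((PySem.List.pyGet? pvDirections d).getD (0, 0)).1,
                cy + ((PySem.List.pyGet? pvDirections d).getD (0, 0)).2))) d
            (pvCell board (cx + ((PySem.List.pyGet? pvDirections d).getD (0, 0)).1)
              (cy + ((PySem.List.pyGet? pvDirections d).getD (0, 0)).2)) hg (pvCombosL n) none
          simp only [Option.map_none] at hmap
          rw [pvStepL_acc, hmap, ← ih, if_neg hvis]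
          cases pvBestSuffix board n
              (cx + ((PySem.List.pyGet? pvDirections d).getD (0, 0)).1)
              (cy + ((PySem.List.pyGet? pvDirections d).getD (0, 0)).2)
              (PySem.Set.add v (cx + ((PySem.List.pyGet? pvDirections d).getD (0, 0)).1,
                cy + ((PySem.List.pyGet? pvDirections d).getD (0, 0)).2)) with
          | none => cases acc <;> rfl
          | some p => cases acc <;> simp [pvComb] <;> split_ifs <;> rfl
    have hC : pvCombosL (n + 1) =
        (pvCombosL n).map ((2 : Int) :: ·) ++ ((pvCombosL n).map ((0 : Int) :: ·) ++
          ((pvCombosL n).map ((6 : Int) :: ·) ++ (pvCombosL n).map ((4 : Int) :: ·))) := by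
      simp [pvCombosL, List.flatMap]
    rw [hC]
    simp only [List.foldl_append]
    rw [dir 2, dir 0, dir 6, dir 4]
    rfl

-- bridging triples and length-3 lists
theorem pvToTriple_cons (a b c : Int) : pvToTriple [a, b, c] = (a, b, c) := by
  simp [pvToTriple, PySem.List.pyGet?, PySem.List.pyIdx?]

theorem pvStepL_triples (f : Int × Int × Int → Option Int) (g : List Int → Option Int)
    (hg : ∀ m : Int × Int × Int, g [m.1, m.2.1, m.2.2] = f m) :
    ∀ (l : List (Int × Int × Int)) (acc : Option (Int × (Int × Int × Int))),
      (l.map (fun m => [m.1, m.2.1, m.2.2])).foldl (pvStepL g)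
          (acc.map (fun b => (b.1, [b.2.1, b.2.2.1, b.2.2.2]))) =
        (l.foldl (pvStepB f) acc).map (fun b => (b.1, [b.2.1, b.2.2.1, b.2.2.2])) := by
  intro l
  induction l with
  | nil => intro acc; rfl
  | cons m t ih =>
    intro acc
    have step : pvStepL g (acc.map (fun b => (b.1, [b.2.1, b.2.2.1, b.2.2.2])))
          [m.1, m.2.1, m.2.2] =
        (pvStepB f acc m).map (fun b => (b.1, [b.2.1, b.2.2.1, b.2.2.2])) := by
      cases hf : f m <;> cases acc <;>
        simp only [pvStepL, pvStepB, hg, hf, Option.map_some, Option.map_none] <;>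
        split_ifs <;> rfl
    show (t.map _).foldl (pvStepL g) (pvStepL g (acc.map _) [m.1, m.2.1, m.2.2]) = _
    rw [step, ih]
    rfl

theorem pvCombosL_three :
    pvCombosL 3 = pvCombosB.map (fun m : Int × Int × Int => [m.1, m.2.1, m.2.2]) := by
  decide

-- ===== VERDICT (by name: the statement is the Claim_ definition above) =====
theorem select_path_spec : Claim_equal_select_path := by
  intro board x y _dom _pre
  unfold Spec_select_path
  have hnn : ∀ m s, (fun m : Int × Int × Int =>
        pvWalkA board [m.1, m.2.1, m.2.2] x y 0 PySem.Set.empty) m = some s → 0 ≤ s :=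
    fun m s h => pvWalkA_le board _ _ _ _ _ _ h
  have eA : select_path board x y =
      (PySem.List.pyGet?
        (PySem.List.sorted
          (pvCombosA.foldl
            (pvStepA (fun m : Int × Int × Int =>
              pvWalkA board [m.1, m.2.1, m.2.2] x y 0 PySem.Set.empty)) (0, [])).2
          pvKeyA) 0).getD (0, 0, 0) := rfl
  rw [eA, pvSelect_general _ hnn]
  have eB : pvBestSuffix board 3 x y PySem.Set.empty =
      (pvCombosB.foldl
        (pvStepB (fun m : Int × Int × Int =>
          pvWalkA board [m.1, m.2.1, m.2.2] x y 0 PySem.Set.empty)) none).map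
        (fun b => (b.1, [b.2.1, b.2.2.1, b.2.2.2])) := by
    rw [pvBestSuffix_eq, pvCombosL_three]
    exact pvStepL_triples _ _ (fun m => rfl) pvCombosB none
  show (match pvCombosB.foldl (pvStepB _) none with
        | some b => b.2 | none => (0, 0, 0)) = select_path_alt board x y
  unfold select_path_alt
  rw [eB]
  cases pvCombosB.foldl (pvStepB (fun m : Int × Int × Int =>
      pvWalkA board [m.1, m.2.1, m.2.2] x y 0 PySem.Set.empty)) none with
  | none => rfl
  | some b => simp [pvToTriple_cons]
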